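-- pv_equiv track=rewrite | github.com/gilhyeon7071-code/contributed-by-me | tools/build_backtest_final_output.py | _domain_status
-- ===== SOURCE A (Python) =====
-- from typing import Any, Dict, List, Tuple
--
-- PASS = "PASS"
--
-- FAIL = "FAIL"
--
-- NE = "NOT_EVALUABLE"
--
-- def _pick_item(items: List[Dict[str, Any]], name: str) -> Dict[str, Any]:
--     hit = next((x for x in items if x.get("name") == name), None)
--     return hit or {}
--
-- def _domain_status(items: List[Dict[str, Any]], names: List[str]) -> str:
--     selected = [_pick_item(items, n) for n in names]
--     selected = [x for x in selected if x]
--     if not selected: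
--         return NE
--     if any(x.get("status") == FAIL for x in selected):
--         return FAIL
--     if any(x.get("status") == NE for x in selected):
--         return NE
--     return PASS
-- ===== SOURCE B (Python) =====
-- from typing import Any, Dict, List
--
-- PASS = "PASS"
-- FAIL = "FAIL"
-- NE = "NOT_EVALUABLE"
--
-- def _domain_status(items: List[Dict[str, Any]], names: List[str]) -> str:
--     # Build a name -> status index in ONE pass over items (first occurrence wins),
--     # then fold over names keeping the worst severity seen (FAIL > NOT_EVALUABLE > PASS),
--     # with early exit once FAIL is reached.
--     index = {}
--     for item in items:
--         nm = item.get("name")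
--         if nm is not None and nm not in index:
--             index[nm] = item.get("status")
--     best = None
--     for n in names:
--         if n in index:
--             st = index[n]
--             rank = 2 if st == FAIL else (1 if st == NE else 0)
--             if best is None or rank > best:
--                 best = rank
--             if best == 2:
--                 break
--     if best is None:
--         return NE
--     if best == 2:
--         return FAIL
--     if best == 1:
--         return NE
--     return PASS
-- ===== Notes on version B (the rewrite author's own statement) =====
-- stated objective: faster
-- what changed: Replaces the per-name _pick_item scans and three any(...) passes over the selection with a name->status dict built in one pass over items (first occurrence wins) followed by a single fold over names that tracks the worst severity seen (FAIL > NOT_EVALUABLE > PASS) with early exit on FAIL.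
import Mathlib
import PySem

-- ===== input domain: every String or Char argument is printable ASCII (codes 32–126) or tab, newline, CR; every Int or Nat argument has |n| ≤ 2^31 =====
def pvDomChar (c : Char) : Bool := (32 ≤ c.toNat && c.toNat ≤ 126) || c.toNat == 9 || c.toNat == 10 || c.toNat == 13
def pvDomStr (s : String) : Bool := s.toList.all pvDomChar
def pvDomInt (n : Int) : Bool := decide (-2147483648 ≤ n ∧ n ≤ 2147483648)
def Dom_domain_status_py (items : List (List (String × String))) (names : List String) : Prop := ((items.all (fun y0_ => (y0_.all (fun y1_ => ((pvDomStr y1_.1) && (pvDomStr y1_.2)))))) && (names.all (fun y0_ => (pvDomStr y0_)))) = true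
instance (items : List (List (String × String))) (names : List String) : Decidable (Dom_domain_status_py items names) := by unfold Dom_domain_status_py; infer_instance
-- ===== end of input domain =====

-- B replaces A's per-name list scans (_pick_item) plus three any(...) passes by one
-- name->status index built in a single pass over items, then a single fold over names
-- keeping the worst severity seen (objective: faster; a timing run measured B faster; removes the inner scan per name).


-- ===== PORT A =====
-- dict.get(k): first match in the association list
def pvGet (d : List (String × String)) (k : String) : Option String :=
  (d.find? (fun p => p.1 == k)).map (·.2)

-- _pick_item: next((x for x in items if x.get("name") == name), None); return hit or {}
def pick_item (items : List (List (String × String))) (name : String) : List (String × String) :=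
  match items.find? (fun x => pvGet x "name" == some name) with
  | some hit => if hit.isEmpty then [] else hit   -- 'hit or {}'
  | none => []

def domain_status_py (items : List (List (String × String))) (names : List String) : String :=
  let selected := names.map (fun n => pick_item items n)
  let selected := selected.filter (fun x => !x.isEmpty)
  if selected.isEmpty then "NOT_EVALUABLE"
  else if selected.any (fun x => pvGet x "status" == some "FAIL") then "FAIL"
  else if selected.any (fun x => pvGet x "status" == some "NOT_EVALUABLE") then "NOT_EVALUABLE"
  else "PASS"

-- ===== PORT B =====
-- rank = 2 if st == FAIL else (1 if st == NE else 0)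
def rankB (st : Option String) : Nat :=
  if st == some "FAIL" then 2 else if st == some "NOT_EVALUABLE" then 1 else 0

-- for item in items: nm = item.get("name"); if nm is not None and nm not in index: index[nm] = item.get("status")
def buildIndex (items : List (List (String × String))) : PySem.Dict String (Option String) :=
  items.foldl (fun d item =>
    match pvGet item "name" with
    | some nm => if d.contains nm then d else d.insert nm (pvGet item "status")
    | none => d) PySem.Dict.empty

-- for n in names: if n in index: ... (early break once best == 2)
def loopB (idx : PySem.Dict String (Option String)) : List String → Option Nat → Option Nat
  | [], best => best
  | n :: ns, best =>
    match idx.get? n with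
    | none => loopB idx ns best
    | some st =>
      let r := rankB st
      let best' := match best with
        | none => some r
        | some b => if r > b then some r else some b
      if best' == some 2 then best' else loopB idx ns best'

def domain_status_py_alt (items : List (List (String × String))) (names : List String) : String :=
  let idx := buildIndex items
  match loopB idx names none with
  | none => "NOT_EVALUABLE"
  | some b => if b == 2 then "FAIL" else if b == 1 then "NOT_EVALUABLE" else "PASS"

-- ===== PRECONDITION & SPEC =====
def Spec_domain_status_py (items : List (List (String × String))) (names : List String) (out : String) : Prop := out = domain_status_py_alt items names
instance (items : List (List (String × String))) (names : List String) (out : String) : Decidable (Spec_domain_status_py items names out) := by unfold Spec_domain_status_py; infer_instance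

-- ===== CLAIM (what is proved, stated in full; the proofs are below) =====
def Claim_equal_domain_status_py : Prop := ∀ (items : List (List (String × String))) (names : List String), Dom_domain_status_py items names → Spec_domain_status_py items names (domain_status_py items names)

-- ===== LEMMAS AND PROOFS =====

-- the statuses of the selected items, as one list
def statList (items : List (List (String × String))) (names : List String) : List (Option String) :=
  names.filterMap (fun n =>
    (items.find? (fun x => pvGet x "name" == some n)).map (fun x => pvGet x "status"))

-- worst severity of a status list
def gS (S : List (Option String)) : Nat :=
  if S.any (· == some "FAIL") then 2 else if S.any (· == some "NOT_EVALUABLE") then 1 else 0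

theorem rankB_le (st : Option String) : rankB st ≤ 2 := by
  unfold rankB; split_ifs <;> omega

theorem gS_le (S : List (Option String)) : gS S ≤ 2 := by
  unfold gS; split_ifs <;> omega

theorem gS_cons (st : Option String) (S : List (Option String)) :
    gS (st :: S) = max (rankB st) (gS S) := by
  unfold gS rankB
  by_cases h1 : st = some "FAIL" <;> by_cases h2 : st = some "NOT_EVALUABLE" <;>
    simp [h1, h2, List.any_cons] <;> split_ifs <;> omega

-- A's selected list is the filterMap over find? (a found hit is never empty)
theorem selected_eq (items : List (List (String × String))) (names : List String) :
    ((names.map (fun n => pick_item items n)).filter (fun x => !x.isEmpty))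
    = names.filterMap (fun n => items.find? (fun x => pvGet x "name" == some n)) := by
  induction names with
  | nil => rfl
  | cons n ns ih =>
    simp only [List.map_cons, List.filter_cons, List.filterMap_cons]
    cases hf : items.find? (fun x => pvGet x "name" == some n) with
    | none =>
      have h1 : pick_item items n = [] := by simp [pick_item, hf]
      simp [h1, ih]
    | some hit =>
      have hp := List.find?_some hf
      have hne : hit.isEmpty = false := by
        cases hit with
        | nil => simp [pvGet] at hp
        | cons a l => rfl
      have h1 : pick_item items n = hit := by simp [pick_item, hf, hne]
      simp [h1, hne, ih]

-- the built index looks up exactly the first item with that name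
theorem buildIndex_get (items : List (List (String × String)))
    (d : PySem.Dict String (Option String)) (n : String) :
    ((items.foldl (fun d item =>
        match pvGet item "name" with
        | some nm => if d.contains nm then d else d.insert nm (pvGet item "status")
        | none => d) d).get? n)
    = match d.get? n with
      | some v => some v
      | none => (items.find? (fun x => pvGet x "name" == some n)).map (fun x => pvGet x "status") := by
  induction items generalizing d with
  | nil => simp; cases d.get? n <;> simp
  | cons item rest ih =>
    simp only [List.foldl_cons, List.find?_cons]
    cases hnm : pvGet item "name" with
    | none =>
      rw [ih]; simp
    | some nm =>
      by_cases hc : d.contains nm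
      · simp only [hc, if_true]
        rw [ih]
        by_cases he : nm = n
        · subst he
          have hs : (d.get? nm).isSome := by
            rw [← PySem.Dict.contains_eq_isSome_get?]; exact hc
          obtain ⟨v, hv⟩ := Option.isSome_iff_exists.mp hs
          simp [hv]
        · have hb : (nm == n) = false := by simp [he]
          simp [hb]
      · have hcf : d.contains nm = false := by simpa using hc
        simp only [hcf, Bool.false_eq_true, if_false]
        rw [ih]
        by_cases he : nm = n
        · subst he
          have hdn : d.get? nm = none := by
            have h2 := PySem.Dict.contains_eq_isSome_get? (d := d) (k := nm)
            rw [hcf] at h2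
            exact Option.not_isSome_iff_eq_none.mp (by simp [← h2])
          rw [PySem.Dict.get?_insert]
          simp [hdn]
        · rw [PySem.Dict.get?_insert]
          have hb : (nm == n) = false := by simp [he]
          simp [Ne.symm he, hb]

theorem buildIndex_get? (items : List (List (String × String))) (n : String) :
    (buildIndex items).get? n
    = (items.find? (fun x => pvGet x "name" == some n)).map (fun x => pvGet x "status") := by
  unfold buildIndex
  rw [buildIndex_get]
  simp

-- B's loop with a running best computes the max with the worst severity of the rest
theorem loopB_some (idx : PySem.Dict String (Option String)) (ns : List String) (b : Nat)
    (hb : b ≤ 2) :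
    loopB idx ns (some b) = some (max b (gS (ns.filterMap idx.get?))) := by
  induction ns generalizing b with
  | nil => simp [loopB, gS]
  | cons n ns ih =>
    simp only [loopB, List.filterMap_cons]
    cases hg : idx.get? n with
    | none => exact ih b hb
    | some st =>
      simp only [gS_cons]
      have hr := rankB_le st
      by_cases h2 : max b (rankB st) = 2
      · have hbeq : ((if rankB st > b then some (rankB st) else some b) == some (2 : Nat)) = true := by
          split_ifs with h <;> simp <;> omega
        rw [hbeq]
        simp only [if_true]
        have := gS_le (ns.filterMap idx.get?)
        have : max b (max (rankB st) (gS (ns.filterMap idx.get?))) = 2 := by omega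
        rw [this]
        split_ifs with h <;> simp <;> omega
      · have hbeq : ((if rankB st > b then some (rankB st) else some b) == some (2 : Nat)) = false := by
          split_ifs with h <;> simp <;> omega
        rw [hbeq]
        simp only [if_false, Bool.false_eq_true]
        have hmax : (if rankB st > b then some (rankB st) else some b) = some (max b (rankB st)) := by
          split_ifs with h <;> congr 1 <;> omega
        rw [hmax, ih (max b (rankB st)) (by omega)]
        congr 1
        omega

theorem loopB_none (idx : PySem.Dict String (Option String)) (ns : List String) :
    loopB idx ns none
    = if (ns.filterMap idx.get?).isEmpty then none else some (gS (ns.filterMap idx.get?)) := by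
  induction ns with
  | nil => simp [loopB]
  | cons n ns ih =>
    simp only [loopB, List.filterMap_cons]
    cases hg : idx.get? n with
    | none => exact ih
    | some st =>
      simp only [gS_cons, List.isEmpty_cons, if_false, Bool.false_eq_true]
      have hr := rankB_le st
      by_cases h2 : rankB st = 2
      · have hbeq : ((some (rankB st) : Option Nat) == some (2 : Nat)) = true := by simp [h2]
        rw [hbeq]
        simp only [if_true, h2]
        have := gS_le (ns.filterMap idx.get?)
        congr 1
        omega
      · have hbeq : ((some (rankB st) : Option Nat) == some (2 : Nat)) = false := by simp [h2]
        rw [hbeq]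
        simp only [if_false, Bool.false_eq_true]
        rw [loopB_some idx ns (rankB st) hr]

-- ===== VERDICT (by name: the statement is the Claim_ definition above) =====
theorem domain_status_py_spec : Claim_equal_domain_status_py := by
  intro items names _
  unfold Spec_domain_status_py domain_status_py domain_status_py_alt
  dsimp only
  have hstat : names.filterMap (buildIndex items).get? = statList items names := by
    unfold statList
    exact List.filterMap_congr (fun n _ => buildIndex_get? items n)
  rw [loopB_none, hstat, selected_eq]
  have hS : statList items names
      = (names.filterMap (fun n => items.find? (fun x => pvGet x "name" == some n))).map
          (fun x => pvGet x "status") := by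
    unfold statList
    rw [List.map_filterMap]
  rw [hS]
  set L := names.filterMap (fun n => items.find? (fun x => pvGet x "name" == some n)) with hL
  cases he : L.isEmpty with
  | true => simp [he]
  | false =>
    have hgm : ∀ v, ((L.map (fun x => pvGet x "status")).any (· == some v))
        = L.any (fun x => pvGet x "status" == some v) := by
      intro v; rw [List.any_map]; rfl
    cases hF : L.any (fun x => pvGet x "status" == some "FAIL") with
    | true =>
      have hg : gS (L.map (fun x => pvGet x "status")) = 2 := by
        unfold gS; rw [hgm]; simp [hF]
      simp [he, hg]
    | false =>
      cases hN : L.any (fun x => pvGet x "status" == some "NOT_EVALUABLE") with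
      | true =>
        have hg : gS (L.map (fun x => pvGet x "status")) = 1 := by
          unfold gS; rw [hgm, hgm]; simp [hF, hN]
        simp [he, hg]
      | false =>
        have hg : gS (L.map (fun x => pvGet x "status")) = 0 := by
          unfold gS; rw [hgm, hgm]; simp [hF, hN]
        simp [he, hg]
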